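-- pv_equiv track=rewrite | github.com/suoeh/cp | wossoly23s2.py | clearArr
-- ===== SOURCE A (Python) =====
-- def clearArr(arr, left, right):
--     newarr = []
--     for i in range(len(arr)):
--         values = [inBounds(arr[i][0], left, right), inBounds(arr[i][1], left, right)]
--         if values[0] and values[1]:
--             continue
--         elif values[0] and not values[1]:
--             newarr.append([right + 1, arr[i][1]])
--         elif not values[0] and values[1]:
--             newarr.append([arr[i][0], left - 1])
--         elif arr[i][1] > right and arr[i][0] < left:
--             newarr.append([arr[i][0], left - 1])
--             newarr.append([right + 1, arr[i][1]])
--         else: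
--             newarr.append([arr[i][0], arr[i][1]])
--     return newarr
--
-- def inBounds(n, left, right):
--     if left <= n <= right: return True
--     return False
-- ===== SOURCE B (Python) =====
-- def clearArr(arr, left, right):
--     def pieces(iv):
--         a, b = iv[0], iv[1]
--         if a < left and b > right:
--             return [[a, left - 1], [right + 1, b]]
--         if left <= a <= right and left <= b <= right:
--             return []
--         return [[right + 1 if left <= a <= right else a,
--                  left - 1 if left <= b <= right else b]]
--     if len(arr) > 1:
--         mid = len(arr) // 2
--         return clearArr(arr[:mid], left, right) + clearArr(arr[mid:], left, right)
--     return pieces(arr[0]) if arr else []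
-- ===== Notes on version B (the rewrite author's own statement) =====
-- stated objective: alternative
-- what changed: Replaces A's index loop with a divide-and-conquer recursion that halves the list and concatenates the two results, and replaces A's four-way endpoint cascade by one split check plus conditional-expression endpoint clipping for the single-interval base case.
import Mathlib
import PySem

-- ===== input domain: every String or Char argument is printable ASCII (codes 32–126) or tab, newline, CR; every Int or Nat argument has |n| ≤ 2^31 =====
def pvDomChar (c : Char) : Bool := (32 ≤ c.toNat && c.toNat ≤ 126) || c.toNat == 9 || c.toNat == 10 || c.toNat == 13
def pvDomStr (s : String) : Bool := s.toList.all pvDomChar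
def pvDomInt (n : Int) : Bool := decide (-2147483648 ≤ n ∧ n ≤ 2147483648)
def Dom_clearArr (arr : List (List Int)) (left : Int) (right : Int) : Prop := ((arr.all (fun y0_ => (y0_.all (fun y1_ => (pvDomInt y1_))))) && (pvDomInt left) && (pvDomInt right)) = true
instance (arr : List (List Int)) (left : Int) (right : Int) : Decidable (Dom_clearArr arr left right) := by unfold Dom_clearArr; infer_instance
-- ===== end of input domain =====

-- B replaces A's index loop by a divide-and-conquer recursion (halve the list,
-- concatenate the recursive results) with a merged clip rule in the base case;
-- objective: alternative, same result.

-- ===== PORT A =====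
def inBounds (n : Int) (left : Int) (right : Int) : Bool :=
  if left ≤ n ∧ n ≤ right then true else false

-- A's loop body for one interval (arr[i][0] = a0, arr[i][1] = a1), branches in A's order
def stepA (left : Int) (right : Int) (a0 : Int) (a1 : Int) : List (List Int) :=
  let values := [inBounds a0 left right, inBounds a1 left right]
  let v0 := values[0]!
  let v1 := values[1]!
  if v0 && v1 then []
  else if v0 && !v1 then [[right + 1, a1]]
  else if !v0 && v1 then [[a0, left - 1]]
  else if a1 > right ∧ a0 < left then [[a0, left - 1], [right + 1, a1]]
  else [[a0, a1]]

def clearArr (arr : List (List Int)) (left : Int) (right : Int) : List (List Int) :=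
  arr.foldl (fun newarr iv =>
    match PySem.List.pyGet? iv 0, PySem.List.pyGet? iv 1 with
    | some a0, some a1 => newarr ++ stepA left right a0 a1
    | _, _ => newarr)   -- Python raises IndexError here; excluded by Pre_clearArr
    []

-- ===== PORT B =====
-- Source B's inner helper `pieces(iv)`
def piecesB (left : Int) (right : Int) (iv : List Int) : List (List Int) :=
  match PySem.List.pyGet? iv 0 with
  | none => []   -- Python raises IndexError here; excluded by Pre_clearArr
  | some a =>
    match PySem.List.pyGet? iv 1 with
    | none => []   -- Python raises IndexError here; excluded by Pre_clearArr
    | some b =>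
      if a < left ∧ b > right then [[a, left - 1], [right + 1, b]]
      else if (left ≤ a ∧ a ≤ right) ∧ (left ≤ b ∧ b ≤ right) then []
      else [[if left ≤ a ∧ a ≤ right then right + 1 else a,
             if left ≤ b ∧ b ≤ right then left - 1 else b]]

def clearArr_alt (arr : List (List Int)) (left : Int) (right : Int) : List (List Int) :=
  if 1 < arr.length then
    clearArr_alt (arr.take (arr.length / 2)) left right
      ++ clearArr_alt (arr.drop (arr.length / 2)) left right
  else
    match arr with
    | [] => []
    | iv :: _ => piecesB left right iv
termination_by arr.length
decreasing_by
  · simp only [List.length_take]; omega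
  · simp only [List.length_drop]; omega

-- ===== PRECONDITION & SPEC =====
-- Pre_: each interval must have at least two entries (A reads arr[i][0] and arr[i][1];
-- on shorter sublists both A and B raise IndexError).
def Pre_clearArr (arr : List (List Int)) (left : Int) (right : Int) : Prop :=
  ∀ iv ∈ arr, 2 ≤ iv.length
instance (arr : List (List Int)) (left : Int) (right : Int) : Decidable (Pre_clearArr arr left right) := by unfold Pre_clearArr; infer_instance

def pvWitness_clearArr : List (List Int) × Int × Int := ([[1, 5], [7, 2], [-3, 10]], 2, 6)

def Spec_clearArr (arr : List (List Int)) (left : Int) (right : Int) (out : List (List Int)) : Prop := out = clearArr_alt arr left right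
instance (arr : List (List Int)) (left : Int) (right : Int) (out : List (List Int)) : Decidable (Spec_clearArr arr left right out) := by unfold Spec_clearArr; infer_instance

-- ===== CLAIM (what is proved, stated in full; the proofs are below) =====
def Claim_equal_clearArr : Prop := ∀ (arr : List (List Int)) (left : Int) (right : Int), Dom_clearArr arr left right → Pre_clearArr arr left right → Spec_clearArr arr left right (clearArr arr left right)

-- ===== LEMMAS AND PROOFS =====

-- pointwise: A's branch cascade on the two fetched endpoints equals B's pieces helper
theorem stepA_eq_piecesB (left right : Int) (iv : List Int) (a b : Int)
    (h0 : PySem.List.pyGet? iv 0 = some a) (h1 : PySem.List.pyGet? iv 1 = some b) :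
    stepA left right a b = piecesB left right iv := by
  simp only [stepA, piecesB, inBounds, h0, h1]
  by_cases ha : left ≤ a ∧ a ≤ right <;>
    by_cases hb : left ≤ b ∧ b ≤ right <;>
      by_cases h3 : a < left <;>
        by_cases h4 : b > right <;>
          simp [ha, hb, h3, h4] <;> omega

-- A's append-accumulator fold equals the flatMap of its step
theorem foldl_step_eq_flatMap (left right : Int) (arr : List (List Int)) (acc : List (List Int)) :
    arr.foldl (fun newarr iv =>
      match PySem.List.pyGet? iv 0, PySem.List.pyGet? iv 1 with
      | some a0, some a1 => newarr ++ stepA left right a0 a1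
      | _, _ => newarr) acc
    = acc ++ arr.flatMap (fun iv =>
        match PySem.List.pyGet? iv 0, PySem.List.pyGet? iv 1 with
        | some a0, some a1 => stepA left right a0 a1
        | _, _ => []) := by
  induction arr generalizing acc with
  | nil => simp
  | cons iv rest ih =>
      simp only [List.foldl_cons, List.flatMap_cons, ih]
      cases PySem.List.pyGet? iv 0 <;> cases PySem.List.pyGet? iv 1 <;> simp

-- B's divide-and-conquer equals the flatMap of its pieces helper
theorem alt_eq_flatMap (left right : Int) :
    ∀ (n : Nat) (arr : List (List Int)), arr.length ≤ n →
      clearArr_alt arr left right = arr.flatMap (piecesB left right) := by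
  intro n
  induction n with
  | zero =>
      intro arr h
      have : arr = [] := List.length_eq_zero_iff.mp (Nat.le_zero.mp h)
      subst this; rw [clearArr_alt.eq_def]; rfl
  | succ m ih =>
      intro arr h
      rw [clearArr_alt.eq_def]
      by_cases hlen : 1 < arr.length
      · have h1 : (arr.take (arr.length / 2)).length ≤ m := by
          simp only [List.length_take]; omega
        have h2 : (arr.drop (arr.length / 2)).length ≤ m := by
          simp only [List.length_drop]; omega
        simp only [hlen, if_true, ih _ h1, ih _ h2]
        rw [← List.flatMap_append, List.take_append_drop]
      · simp only [hlen, if_false]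
        match arr with
        | [] => rfl
        | [iv] => simp
        | iv :: iv' :: rest => simp at hlen

-- ===== VERDICT (by name: the statement is the Claim_ definition above) =====
theorem clearArr_spec : Claim_equal_clearArr := by
  intro arr left right _ hpre
  unfold Spec_clearArr clearArr
  rw [foldl_step_eq_flatMap, alt_eq_flatMap left right arr.length arr le_rfl]
  simp only [List.nil_append]
  refine List.flatMap_congr (fun iv hiv => ?_)
  have h2 : 2 ≤ iv.length := hpre iv hiv
  match iv, h2 with
  | a :: b :: rest, _ =>
      have h0 : PySem.List.pyGet? (a :: b :: rest) (0 : Int) = some a :=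
        PySem.List.pyGet?_zero_cons ..
      have h1 : PySem.List.pyGet? (a :: b :: rest) (1 : Int) = some b := by
        have := PySem.List.pyGet?_cons_succ (x := a) (xs := b :: rest) (n := 0)
        simpa using this
      rw [h0, h1]
      exact stepA_eq_piecesB left right _ a b h0 h1
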